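-- pv_equiv track=rewrite | github.com/Sepevalle/SoloQ-Cerditos | services/role_quest_service.py | _extract_boots_item_id
-- ===== SOURCE A (Python) =====
-- BOOT_ITEM_SUFFIXES = (
--     "1001",
--     "2422",
--     "3005",
--     "3006",
--     "3009",
--     "3020",
--     "3047",
--     "3111",
--     "3117",
--     "3158",
-- )
--
-- def _extract_boots_item_id(items):
--     fallback_boots = None
--
--     for item_id in items:
--         if not item_id:
--             continue
--
--         item_text = str(item_id)
--         for suffix in BOOT_ITEM_SUFFIXES:
--             if not item_text.endswith(suffix):
--                 continue
--
--             normalized_boots = int(suffix)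
--             if normalized_boots != 1001:
--                 return normalized_boots
--
--             if fallback_boots is None:
--                 fallback_boots = normalized_boots
--             break
--
--     return fallback_boots
-- ===== SOURCE B (Python) =====
-- _BOOT_CODES = frozenset((1001, 2422, 3005, 3006, 3009, 3020, 3047, 3111, 3117, 3158))
--
--
-- def _extract_boots_item_id(items):
--     # Arithmetic re-implementation: a boots id is recognised by its last four
--     # decimal digits, i.e. by abs(id) % 10000 (all boot codes are >= 1001, so
--     # no leading-zero padding can interfere).
--     saw_base_boots = False
--     for item_id in items:
--         code = abs(item_id) % 10000
--         if code in _BOOT_CODES: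
--             if code != 1001:
--                 return code
--             saw_base_boots = True
--     return 1001 if saw_base_boots else None
-- ===== Notes on version B (the rewrite author's own statement) =====
-- stated objective: alternative
-- what changed: B drops the str() conversion and the inner suffix-scan loop entirely: it recognises a boots item arithmetically via abs(item_id) % 10000 membership in a frozenset of boot codes, tracking the 1001 fallback with a boolean flag instead of an Option.
import Mathlib
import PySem

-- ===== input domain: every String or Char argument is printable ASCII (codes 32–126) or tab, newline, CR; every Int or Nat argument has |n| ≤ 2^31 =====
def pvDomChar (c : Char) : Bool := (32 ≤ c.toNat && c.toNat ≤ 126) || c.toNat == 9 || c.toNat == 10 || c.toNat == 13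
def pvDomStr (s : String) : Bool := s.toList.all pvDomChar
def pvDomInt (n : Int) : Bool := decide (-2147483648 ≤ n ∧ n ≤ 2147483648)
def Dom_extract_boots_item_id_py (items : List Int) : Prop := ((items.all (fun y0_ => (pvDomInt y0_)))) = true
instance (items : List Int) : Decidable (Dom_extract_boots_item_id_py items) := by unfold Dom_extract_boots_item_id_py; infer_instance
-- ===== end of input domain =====

-- B replaces A's per-item string conversion and suffix scan by the arithmetic test abs(id) % 10000
-- against a set of boot codes (return values only; neither program mutates its argument).

-- ===== PORT A =====
-- BOOT_ITEM_SUFFIXES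
def pvBootSuffixes : List String :=
  ["1001", "2422", "3005", "3006", "3009", "3020", "3047", "3111", "3117", "3158"]

inductive PvInner where
  | ret : Int → PvInner
  | fall : Int → PvInner
  | nomatch : PvInner
deriving DecidableEq, Repr

def pvInnerA (text : String) : List String → PvInner
  | [] => .nomatch
  | s :: rest =>
    if PySem.Str.endswith text s then
      let v := (PySem.Int.ofStr? s).getD 0
      if v ≠ 1001 then .ret v else .fall v
    else pvInnerA text rest

def pvLoopA : List Int → Option Int → Option Int
  | [], fb => fb
  | item_id :: rest, fb =>
    if item_id = 0 then pvLoopA rest fb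
    else
      match pvInnerA (PySem.Int.toStr item_id) pvBootSuffixes with
      | .ret v => some v
      | .fall v => pvLoopA rest (if fb = none then some v else fb)
      | .nomatch => pvLoopA rest fb

def extract_boots_item_id_py (items : List Int) : Option Int :=
  pvLoopA items none

-- ===== PORT B =====
-- _BOOT_CODES (a Python frozenset)
def pvBootCodes : PySem.Set Int :=
  PySem.Set.ofList [1001, 2422, 3005, 3006, 3009, 3020, 3047, 3111, 3117, 3158]

def pvLoopB : List Int → Bool → Option Int
  | [], saw => if saw then some 1001 else none
  | item_id :: rest, saw =>
    let code := PySem.Int.mod |item_id| 10000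
    if code ∈ pvBootCodes then
      if code ≠ 1001 then some code else pvLoopB rest true
    else pvLoopB rest saw

def extract_boots_item_id_py_alt (items : List Int) : Option Int :=
  pvLoopB items false

-- ===== PRECONDITION & SPEC =====
def Spec_extract_boots_item_id_py (items : List Int) (out : Option Int) : Prop := out = extract_boots_item_id_py_alt items
instance (items : List Int) (out : Option Int) : Decidable (Spec_extract_boots_item_id_py items out) := by unfold Spec_extract_boots_item_id_py; infer_instance

-- ===== CLAIM (what is proved, stated in full; the proofs are below) =====
def Claim_equal_extract_boots_item_id_py : Prop := ∀ (items : List Int), Dom_extract_boots_item_id_py items → Spec_extract_boots_item_id_py items (extract_boots_item_id_py items)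

-- ===== LEMMAS AND PROOFS =====

-- toDigitsCore: the accumulator is just appended
lemma pv_tdc_acc : ∀ (f n : Nat) (ds : List Char),
    Nat.toDigitsCore 10 f n ds = Nat.toDigitsCore 10 f n [] ++ ds := by
  intro f
  induction f with
  | zero => intro n ds; simp [Nat.toDigitsCore]
  | succ f ih =>
    intro n ds
    simp only [Nat.toDigitsCore]
    by_cases h : n / 10 = 0
    · simp [h]
    · simp only [h, if_false]
      rw [ih (n / 10) ((n % 10).digitChar :: ds), ih (n / 10) [(n % 10).digitChar]]
      simp

-- toDigitsCore: any sufficient fuel computes the same list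
lemma pv_tdc_fuel : ∀ (f g n : Nat) (ds : List Char), n < f → n < g →
    Nat.toDigitsCore 10 f n ds = Nat.toDigitsCore 10 g n ds := by
  intro f
  induction f with
  | zero => intro g n ds h; omega
  | succ f ih =>
    intro g n ds hf hg
    cases g with
    | zero => omega
    | succ g =>
      simp only [Nat.toDigitsCore]
      by_cases h : n / 10 = 0
      · simp [h]
      · simp only [h, if_false]
        exact ih g (n / 10) _ (by omega) (by omega)

-- str(n) for one digit
lemma pv_toDigits_small {n : Nat} (h : n < 10) : Nat.toDigits 10 n = [n.digitChar] := by
  have h' : n / 10 = 0 := by omega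
  simp [Nat.toDigits, Nat.toDigitsCore, h', Nat.mod_eq_of_lt h]

-- str(n) peels its last digit
lemma pv_toDigits_step {n : Nat} (h : 10 ≤ n) :
    Nat.toDigits 10 n = Nat.toDigits 10 (n / 10) ++ [(n % 10).digitChar] := by
  have h' : n / 10 ≠ 0 := by omega
  simp only [Nat.toDigits, Nat.toDigitsCore, h', if_false]
  rw [pv_tdc_acc]
  congr 1
  exact pv_tdc_fuel n (n / 10 + 1) (n / 10) [] (by omega) (by omega)

lemma pv_digitChar_inj {i j : Nat} (hi : i < 10) (hj : j < 10) :
    (i.digitChar = j.digitChar) ↔ i = j := by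
  interval_cases i <;> interval_cases j <;> decide

lemma pv_suffix_snoc (q : List Char) (x y : Char) (l : List Char) :
    q ++ [x] <:+ l ++ [y] ↔ x = y ∧ q <:+ l := by
  rw [← List.reverse_prefix]
  simp [List.prefix_cons_iff, List.reverse_prefix]

-- single-digit suffix: [digitChar d] is a suffix of str(m) iff d is m's last digit
lemma pv_suffix_one {d : Nat} (hd : d < 10) (m : Nat) :
    (([d.digitChar] : List Char) <:+ Nat.toDigits 10 m) ↔ d = m % 10 := by
  by_cases h : m < 10
  · rw [pv_toDigits_small h]
    have : m % 10 = m := Nat.mod_eq_of_lt h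
    rw [this]
    constructor
    · intro hs
      rcases List.suffix_cons_iff.mp hs with h1 | h1
      · exact (pv_digitChar_inj hd h).mp (List.head_eq_of_cons_eq h1)
      · simp at h1
    · intro he; rw [he]
  · rw [pv_toDigits_step (by omega)]
    have : ([d.digitChar] : List Char) = [] ++ [d.digitChar] := by simp
    rw [this, pv_suffix_snoc]
    simp [pv_digitChar_inj hd (Nat.mod_lt _ (by omega))]

-- the key decimal fact: a four-digit suffix (leading digit nonzero) of str(n) is exactly n % 10000
lemma pv_suffix_four {d3 d2 d1 d0 : Nat} (h3 : d3 < 10) (h2 : d2 < 10) (h1 : d1 < 10)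
    (h0 : d0 < 10) (hp : 1 ≤ d3) (n : Nat) :
    (([d3.digitChar, d2.digitChar, d1.digitChar, d0.digitChar] : List Char) <:+ Nat.toDigits 10 n)
      ↔ n % 10000 = 1000 * d3 + 100 * d2 + 10 * d1 + d0 := by
  by_cases ha : n < 10
  · rw [pv_toDigits_small ha]
    constructor
    · intro hs
      rcases List.suffix_cons_iff.mp hs with h | h
      · simp at h
      · simp at h
    · intro he; omega
  · rw [pv_toDigits_step (by omega)]
    have e0 : ([d3.digitChar, d2.digitChar, d1.digitChar, d0.digitChar] : List Char)
        = [d3.digitChar, d2.digitChar, d1.digitChar] ++ [d0.digitChar] := by simp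
    rw [e0, pv_suffix_snoc, pv_digitChar_inj h0 (Nat.mod_lt _ (by omega))]
    by_cases hb : n / 10 < 10
    · rw [pv_toDigits_small hb]
      constructor
      · rintro ⟨-, hs⟩
        rcases List.suffix_cons_iff.mp hs with h | h
        · simp at h
        · simp at h
      · intro he; omega
    · rw [pv_toDigits_step (by omega)]
      have e1 : ([d3.digitChar, d2.digitChar, d1.digitChar] : List Char)
          = [d3.digitChar, d2.digitChar] ++ [d1.digitChar] := by simp
      rw [e1, pv_suffix_snoc, pv_digitChar_inj h1 (Nat.mod_lt _ (by omega))]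
      by_cases hc : n / 10 / 10 < 10
      · rw [pv_toDigits_small hc]
        constructor
        · rintro ⟨-, -, hs⟩
          rcases List.suffix_cons_iff.mp hs with h | h
          · simp at h
          · simp at h
        · intro he; omega
      · rw [pv_toDigits_step (by omega)]
        have e2 : ([d3.digitChar, d2.digitChar] : List Char)
            = [d3.digitChar] ++ [d2.digitChar] := by simp
        rw [e2, pv_suffix_snoc, pv_digitChar_inj h2 (Nat.mod_lt _ (by omega)),
          pv_suffix_one h3 (n / 10 / 10 / 10)]
        omega

-- a digit char is never '-'
lemma pv_digitChar_ne_dash {d : Nat} (hd : d < 10) : d.digitChar ≠ '-' := by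
  interval_cases d <;> decide

-- str(item_id).endswith(suffix) for a four-digit suffix reads abs(item_id) % 10000
lemma pv_endswith_abs {d3 d2 d1 d0 : Nat} (h3 : d3 < 10) (h2 : d2 < 10) (h1 : d1 < 10)
    (h0 : d0 < 10) (hp : 1 ≤ d3) (id : Int) :
    PySem.Chars.endswith (PySem.Int.toChars id)
        [d3.digitChar, d2.digitChar, d1.digitChar, d0.digitChar]
      = decide (id.natAbs % 10000 = 1000 * d3 + 100 * d2 + 10 * d1 + d0) := by
  have key : PySem.Chars.endswith (PySem.Int.toChars id)
        [d3.digitChar, d2.digitChar, d1.digitChar, d0.digitChar] = true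
      ↔ id.natAbs % 10000 = 1000 * d3 + 100 * d2 + 10 * d1 + d0 := by
    rw [PySem.Chars.endswith_iff, PySem.Int.toChars]
    by_cases hneg : id < 0
    · simp only [hneg, if_true]
      rw [List.suffix_cons_iff]
      constructor
      · rintro (h | h)
        · exact absurd (List.head_eq_of_cons_eq h.symm).symm (pv_digitChar_ne_dash h3)
        · exact (pv_suffix_four h3 h2 h1 h0 hp _).mp h
      · intro hmod
        exact Or.inr ((pv_suffix_four h3 h2 h1 h0 hp _).mpr hmod)
    · simp only [hneg, if_false]
      have he : id.toNat = id.natAbs := by omega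
      rw [he]
      exact pv_suffix_four h3 h2 h1 h0 hp _
  rcases Bool.eq_false_or_eq_true (PySem.Chars.endswith (PySem.Int.toChars id)
      [d3.digitChar, d2.digitChar, d1.digitChar, d0.digitChar]) with hE | hE <;> rw [hE] <;> symm
  · simp only [decide_eq_true_eq]
    exact key.mp hE
  · simp only [decide_eq_false_iff_not]
    intro hmod
    rw [key.mpr hmod] at hE
    exact absurd hE (by simp)

lemma pv_innerA_eq (id : Int) :
    pvInnerA (PySem.Int.toStr id) pvBootSuffixes =
      (if id.natAbs % 10000 = 1001 then .fall 1001
       else if id.natAbs % 10000 = 2422 then .ret 2422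
       else if id.natAbs % 10000 = 3005 then .ret 3005
       else if id.natAbs % 10000 = 3006 then .ret 3006
       else if id.natAbs % 10000 = 3009 then .ret 3009
       else if id.natAbs % 10000 = 3020 then .ret 3020
       else if id.natAbs % 10000 = 3047 then .ret 3047
       else if id.natAbs % 10000 = 3111 then .ret 3111
       else if id.natAbs % 10000 = 3117 then .ret 3117
       else if id.natAbs % 10000 = 3158 then .ret 3158
       else .nomatch) := by
  have hE : ∀ (s : String) (d3 d2 d1 d0 : Nat), d3 < 10 → d2 < 10 → d1 < 10 → d0 < 10 →
      1 ≤ d3 → s.toList = [d3.digitChar, d2.digitChar, d1.digitChar, d0.digitChar] →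
      PySem.Str.endswith (PySem.Int.toStr id) s
        = decide (id.natAbs % 10000 = 1000 * d3 + 100 * d2 + 10 * d1 + d0) := by
    intro s d3 d2 d1 d0 h3 h2 h1 h0 hp hs
    rw [PySem.Str.endswith_eq, PySem.Int.toList_toStr, hs]
    exact pv_endswith_abs h3 h2 h1 h0 hp id
  simp only [pvBootSuffixes, pvInnerA,
    hE "1001" 1 0 0 1 (by omega) (by omega) (by omega) (by omega) (by omega) (by decide),
    hE "2422" 2 4 2 2 (by omega) (by omega) (by omega) (by omega) (by omega) (by decide),
    hE "3005" 3 0 0 5 (by omega) (by omega) (by omega) (by omega) (by omega) (by decide),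
    hE "3006" 3 0 0 6 (by omega) (by omega) (by omega) (by omega) (by omega) (by decide),
    hE "3009" 3 0 0 9 (by omega) (by omega) (by omega) (by omega) (by omega) (by decide),
    hE "3020" 3 0 2 0 (by omega) (by omega) (by omega) (by omega) (by omega) (by decide),
    hE "3047" 3 0 4 7 (by omega) (by omega) (by omega) (by omega) (by omega) (by decide),
    hE "3111" 3 1 1 1 (by omega) (by omega) (by omega) (by omega) (by omega) (by decide),
    hE "3117" 3 1 1 7 (by omega) (by omega) (by omega) (by omega) (by omega) (by decide),
    hE "3158" 3 1 5 8 (by omega) (by omega) (by omega) (by omega) (by omega) (by decide),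
    show ((PySem.Int.ofStr? "1001").getD 0 : Int) = 1001 from by decide,
    show ((PySem.Int.ofStr? "2422").getD 0 : Int) = 2422 from by decide,
    show ((PySem.Int.ofStr? "3005").getD 0 : Int) = 3005 from by decide,
    show ((PySem.Int.ofStr? "3006").getD 0 : Int) = 3006 from by decide,
    show ((PySem.Int.ofStr? "3009").getD 0 : Int) = 3009 from by decide,
    show ((PySem.Int.ofStr? "3020").getD 0 : Int) = 3020 from by decide,
    show ((PySem.Int.ofStr? "3047").getD 0 : Int) = 3047 from by decide,
    show ((PySem.Int.ofStr? "3111").getD 0 : Int) = 3111 from by decide,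
    show ((PySem.Int.ofStr? "3117").getD 0 : Int) = 3117 from by decide,
    show ((PySem.Int.ofStr? "3158").getD 0 : Int) = 3158 from by decide,
    decide_eq_true_eq]
  norm_num

lemma pv_code_eq (id : Int) : PySem.Int.mod |id| 10000 = ((id.natAbs % 10000 : Nat) : Int) := by
  rw [Int.abs_eq_natAbs, show (10000 : Int) = ((10000 : Nat) : Int) from by norm_num,
    PySem.Int.mod_natCast]

lemma pv_loops_agree : ∀ (items : List Int) (saw : Bool),
    pvLoopA items (if saw then some 1001 else none) = pvLoopB items saw := by
  intro items
  induction items with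
  | nil => intro saw; simp [pvLoopA, pvLoopB]
  | cons id rest ih =>
    intro saw
    rw [pvLoopA, pvLoopB]
    simp only [pv_code_eq id]
    by_cases hz : id = 0
    · rw [if_pos hz, hz]
      rw [if_neg (by decide : ¬ (((Int.natAbs 0 % 10000 : Nat) : Int) ∈ pvBootCodes))]
      exact ih saw
    · rw [if_neg hz, pv_innerA_eq id]
      set c : Nat := id.natAbs % 10000 with hc
      by_cases m1 : c = 1001
      · rw [if_pos m1, m1]
        rw [if_pos (by decide : (((1001 : Nat) : Int) ∈ pvBootCodes))]
        rw [if_neg (show ¬(((1001 : Nat) : Int) ≠ 1001) by decide)]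
        cases saw
        · exact ih true
        · exact ih true
      · rw [if_neg m1]
        rcases (by omega : c = 2422 ∨ c = 3005 ∨ c = 3006 ∨ c = 3009 ∨ c = 3020 ∨ c = 3047 ∨
            c = 3111 ∨ c = 3117 ∨ c = 3158 ∨ (c ≠ 2422 ∧ c ≠ 3005 ∧ c ≠ 3006 ∧ c ≠ 3009 ∧
            c ≠ 3020 ∧ c ≠ 3047 ∧ c ≠ 3111 ∧ c ≠ 3117 ∧ c ≠ 3158)) with
          h | h | h | h | h | h | h | h | h | h
        · rw [h]; simp [pvBootCodes, PySem.Set.ofList]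
        · rw [h]; simp [pvBootCodes, PySem.Set.ofList]
        · rw [h]; simp [pvBootCodes, PySem.Set.ofList]
        · rw [h]; simp [pvBootCodes, PySem.Set.ofList]
        · rw [h]; simp [pvBootCodes, PySem.Set.ofList]
        · rw [h]; simp [pvBootCodes, PySem.Set.ofList]
        · rw [h]; simp [pvBootCodes, PySem.Set.ofList]
        · rw [h]; simp [pvBootCodes, PySem.Set.ofList]
        · rw [h]; simp [pvBootCodes, PySem.Set.ofList]
        · obtain ⟨n2, n3, n4, n5, n6, n7, n8, n9, n10⟩ := h
          rw [if_neg n2, if_neg n3, if_neg n4, if_neg n5, if_neg n6, if_neg n7, if_neg n8,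
            if_neg n9, if_neg n10]
          have hmem : ¬ (((c : Nat) : Int) ∈ pvBootCodes) := by
            simp only [pvBootCodes, PySem.Set.ofList]
            intro hmemb
            simp at hmemb
            omega
          rw [if_neg hmem]
          exact ih saw

-- ===== VERDICT (by name: the statement is the Claim_ definition above) =====
theorem extract_boots_item_id_py_spec : Claim_equal_extract_boots_item_id_py := by
  intro items _
  unfold Spec_extract_boots_item_id_py extract_boots_item_id_py extract_boots_item_id_py_alt
  simpa using pv_loops_agree items false
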